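-- pv_equiv track=rewrite | github.com/NAMYUNWOO/ProblemSolving | 5주차/exercise2-2.py | genome_length_helper
-- ===== SOURCE A (Python) =====
-- def genome_length_helper(s, cache, l_cache, i, j):
--     ret = cache[i][j]
--     if ret != -1:
--         return ret
--
--     max_length = -9999
--     if (s[i] == 'a' and s[j] == 't') or (s[i] == 'g' and s[j] == 'c'):
--         max_length = genome_length_helper(s, cache, l_cache, i + 1, j - 1) + 2
--
--     save_k = 0
--     for k in range(i, j - 1 + 1):
--         temp = genome_length_helper(s, cache, l_cache, i, k)
--         temp2 = genome_length_helper(s, cache, l_cache, k + 1, j)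
--         temp += temp2
--         if temp > max_length:
--             max_length = temp
--             save_k = k
--
--     l_cache[i][j] = save_k
--     cache[i][j] = max_length
--
--     return cache[i][j]
-- ===== SOURCE B (Python) =====
-- def genome_length_helper(s, cache, l_cache, i, j):
--     # Bottom-up interval DP over widths; equivalence with A is about the return
--     # value only (A memoizes in place into cache/l_cache, B does not mutate them).
--     c0 = cache[i][j]
--     if c0 != -1:          # memoized cell: return the stored value
--         return c0
--     if j < i:             # empty interval: nothing can pair
--         return -9999
--
--     def pair(a, b):
--         return (a == 'a' and b == 't') or (a == 'g' and b == 'c')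
--
--     best = {}
--
--     def get(p, q):
--         if q < p:
--             c = cache[p][q]
--             return c if c != -1 else -9999
--         return best[(p, q)]
--
--     for width in range(0, j - i + 1):
--         for p in range(i, j - width + 1):
--             q = p + width
--             c = cache[p][q]
--             if c != -1:
--                 best[(p, q)] = c
--                 continue
--             m = get(p + 1, q - 1) + 2 if pair(s[p], s[q]) else -9999
--             for k in range(p, q):
--                 m = max(m, get(p, k) + get(k + 1, q))
--             best[(p, q)] = m
--     return best[(i, j)]
-- ===== Notes on version B (the rewrite author's own statement) =====
-- stated objective: alternative
-- what changed: Replaced A's top-down memoized recursion (which mutates cache/l_cache in place) with a non-mutating bottom-up interval DP that fills a width-ordered table, with a memo shortcut and an empty-interval base case; Pre_ excludes inputs where A raises (IndexError) and reversed intervals with pairing endpoints, where A's result rests on negative-index wraparound into unrelated cells.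
import Mathlib
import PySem

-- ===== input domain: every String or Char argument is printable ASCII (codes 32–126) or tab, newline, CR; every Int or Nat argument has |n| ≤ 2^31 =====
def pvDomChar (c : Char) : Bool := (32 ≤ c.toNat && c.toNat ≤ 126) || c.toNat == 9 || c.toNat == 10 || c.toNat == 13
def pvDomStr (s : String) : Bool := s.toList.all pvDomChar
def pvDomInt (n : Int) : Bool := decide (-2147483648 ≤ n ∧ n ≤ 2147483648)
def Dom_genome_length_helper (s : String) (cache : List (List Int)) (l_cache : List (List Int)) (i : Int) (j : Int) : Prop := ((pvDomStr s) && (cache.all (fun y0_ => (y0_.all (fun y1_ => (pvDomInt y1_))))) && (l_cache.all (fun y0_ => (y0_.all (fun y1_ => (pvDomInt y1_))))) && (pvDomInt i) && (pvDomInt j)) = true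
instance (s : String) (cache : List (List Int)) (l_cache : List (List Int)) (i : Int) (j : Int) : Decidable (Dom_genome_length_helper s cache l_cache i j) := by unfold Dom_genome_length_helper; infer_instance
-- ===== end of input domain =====

-- B replaces A's top-down memoized recursion by a bottom-up interval DP over widths (objective: alternative).
-- A memoizes in place into cache/l_cache; B does not mutate its arguments: the equivalence proved is about the RETURN VALUE only.

-- ===== PORT A =====
-- literal rendering of the Python expression cache[p][q] (the pyGetD defaults are
-- totality guards only: under Pre_ every such access is in range, so this is exact)
def pvRd (C : List (List Int)) (p q : Int) : Int :=
  PySem.List.pyGetD (PySem.List.pyGetD C p []) q 0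

-- literal rendering of cache[p][q] = v (same in-range guarantee under Pre_)
def pvWr (C : List (List Int)) (p q : Int) (v : Int) : List (List Int) :=
  PySem.List.pySetD C p (PySem.List.pySetD (PySem.List.pyGetD C p []) q v)

-- s[p] (in range under Pre_; the default is a totality guard)
def pvChr (s : String) (p : Int) : Char := (PySem.Str.pyGet? s p).getD ' '

-- A's pairing condition (s[i] == 'a' and s[j] == 't') or (s[i] == 'g' and s[j] == 'c')
def pvPairA (s : String) (i j : Int) : Bool :=
  ((pvChr s i == 'a') && (pvChr s j == 't')) || ((pvChr s i == 'g') && (pvChr s j == 'c'))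

-- state-threaded transliteration of A (the mutated cache/l_cache pair is the state);
-- the Nat fuel only makes the Python recursion structural: under Pre_ the initial
-- fuel is never exhausted (proved in goA_spec below)
def pvGoA (s : String) : Nat → List (List Int) × List (List Int) → Int → Int → Int × (List (List Int) × List (List Int))
  | 0, st, _, _ => (0, st)
  | Nat.succ fuel, st, i, j =>
    let ret := pvRd st.1 i j
    if ret ≠ -1 then (ret, st)
    else
      -- max_length = -9999 / pairing branch
      let ms : Int × (List (List Int) × List (List Int)) :=
        if pvPairA s i j then
          let r := pvGoA s fuel st (i + 1) (j - 1)
          (r.1 + 2, r.2)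
        else (-9999, st)
      -- for k in range(i, j - 1 + 1): ...
      let z : Int × Int × (List (List Int) × List (List Int)) :=
        (PySem.List.pyRange i ((j - 1) + 1) 1).foldl
          (fun acc k =>
            let r1 := pvGoA s fuel acc.2.2 i k
            let temp := r1.1
            let r2 := pvGoA s fuel r1.2 (k + 1) j
            let temp2 := r2.1
            let temp := temp + temp2
            if temp > acc.1 then (temp, k, r2.2) else (acc.1, acc.2.1, r2.2))
          (ms.1, (0 : Int), ms.2)
      -- l_cache[i][j] = save_k ; cache[i][j] = max_length ; return cache[i][j]
      let st1 := (z.2.2.1, pvWr z.2.2.2 i j z.2.1)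
      let st2 := (pvWr st1.1 i j z.1, st1.2)
      (pvRd st2.1 i j, st2)

def genome_length_helper (s : String) (cache : List (List Int)) (l_cache : List (List Int)) (i : Int) (j : Int) : Int :=
  (pvGoA s ((j - i + 2).toNat + 1) (cache, l_cache) i j).1

-- ===== PORT B =====
-- Source B's pair(a, b)
def pvPairB (a b : Char) : Bool := ((a == 'a') && (b == 't')) || ((a == 'g') && (b == 'c'))

-- Source B's get(p, q): best[(p, q)] lookup (the getD 0 is a totality guard for the
-- KeyError case, which cannot occur under Pre_)
def pvBGet (cache : List (List Int)) (best : PySem.Dict (Int × Int) Int) (p q : Int) : Int :=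
  if q < p then
    let c := pvRd cache p q
    if c ≠ -1 then c else -9999
  else ((best.get? (p, q)).getD 0)

-- bottom-up transliteration of Source B: memo shortcut, empty-interval base case,
-- then fill best by increasing interval width
def genome_length_helper_alt (s : String) (cache : List (List Int)) (l_cache : List (List Int)) (i : Int) (j : Int) : Int :=
  let c0 := pvRd cache i j
  if c0 ≠ -1 then c0
  else if j < i then -9999
  else
  let best : PySem.Dict (Int × Int) Int :=
    (PySem.List.pyRange 0 (j - i + 1) 1).foldl
      (fun best width =>
        (PySem.List.pyRange i (j - width + 1) 1).foldl
          (fun best p =>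
            let q := p + width
            let c := pvRd cache p q
            if c ≠ -1 then best.insert (p, q) c
            else
              let m := if pvPairB (pvChr s p) (pvChr s q) then pvBGet cache best (p + 1) (q - 1) + 2 else -9999
              let m := (PySem.List.pyRange p q 1).foldl
                (fun m k => max m (pvBGet cache best p k + pvBGet cache best (k + 1) q)) m
              best.insert (p, q) m)
          best)
      PySem.Dict.empty
  (best.get? (i, j)).getD 0

-- ===== PRECONDITION & SPEC =====
-- Pre_ admits (1) a memoized cell (A returns cache[i][j] at once), (2) a reversed
-- interval j < i whose endpoints do not pair (A returns -9999), and (3) the real DP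
-- case 0 ≤ i ≤ j < len(s) with len(s) × len(s) cache/l_cache tables, the shape the
-- memoized DP is written for (every row long enough for the [i, j] triangle).  Excluded: inputs where A raises (IndexError), and
-- reversed intervals whose endpoints pair, where A's value (when it returns at all)
-- rests on Python's accidental negative-index wraparound into unrelated cells.
def Pre_genome_length_helper (s : String) (cache : List (List Int)) (l_cache : List (List Int)) (i : Int) (j : Int) : Prop :=
  (PySem.Raise.InRange cache.length i ∧
     PySem.Raise.InRange (PySem.List.pyGetD cache i []).length j ∧
     pvRd cache i j ≠ -1) ∨
  (PySem.Raise.InRange cache.length i ∧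
     PySem.Raise.InRange (PySem.List.pyGetD cache i []).length j ∧
     pvRd cache i j = -1 ∧ j < i ∧
     PySem.Raise.InRange s.toList.length i ∧ PySem.Raise.InRange s.toList.length j ∧
     pvPairA s i j = false ∧
     PySem.Raise.InRange l_cache.length i ∧
     PySem.Raise.InRange (PySem.List.pyGetD l_cache i []).length j) ∨
  (0 ≤ i ∧ i ≤ j ∧ j < (s.toList.length : Int) ∧
     j < (cache.length : Int) ∧ (∀ r ∈ cache, j < (r.length : Int)) ∧
     j < (l_cache.length : Int) ∧ (∀ r ∈ l_cache, j < (r.length : Int)))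
instance (s : String) (cache : List (List Int)) (l_cache : List (List Int)) (i : Int) (j : Int) : Decidable (Pre_genome_length_helper s cache l_cache i j) := by unfold Pre_genome_length_helper; infer_instance

def pvWitness_genome_length_helper : String × List (List Int) × List (List Int) × Int × Int :=
  ("at", [[-1, -1], [-1, -1]], [[0, 0], [0, 0]], 0, 1)

def Spec_genome_length_helper (s : String) (cache : List (List Int)) (l_cache : List (List Int)) (i : Int) (j : Int) (out : Int) : Prop := out = genome_length_helper_alt s cache l_cache i j
instance (s : String) (cache : List (List Int)) (l_cache : List (List Int)) (i : Int) (j : Int) (out : Int) : Decidable (Spec_genome_length_helper s cache l_cache i j out) := by unfold Spec_genome_length_helper; infer_instance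

-- ===== CLAIM (what is proved, stated in full; the proofs are below) =====
def Claim_equal_genome_length_helper : Prop := ∀ (s : String) (cache : List (List Int)) (l_cache : List (List Int)) (i : Int) (j : Int), Dom_genome_length_helper s cache l_cache i j → Pre_genome_length_helper s cache l_cache i j → Spec_genome_length_helper s cache l_cache i j (genome_length_helper s cache l_cache i j)

-- ===== LEMMAS AND PROOFS =====

-- the pure per-cell value of the DP (with the original cache C as memo seed): the
-- common functional specification both ports are proved against
def pvVal (s : String) (C : List (List Int)) (p q : Int) : Int :=
  let c := pvRd C p q
  if c ≠ -1 then c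
  else if q < p then -9999
  else
    let m0 := if pvPairA s p q then pvVal s C (p + 1) (q - 1) + 2 else -9999
    (PySem.List.pyRange p q 1).attach.foldl
      (fun m k => max m (pvVal s C p k.1 + pvVal s C (k.1 + 1) q)) m0
termination_by (q - p + 2).toNat
decreasing_by
  · omega
  · have hk := (PySem.List.mem_pyRange_one.mp k.2); omega
  · have hk := (PySem.List.mem_pyRange_one.mp k.2); omega

theorem pvVal_eq (s : String) (C : List (List Int)) (p q : Int) :
    pvVal s C p q =
      (let c := pvRd C p q
       if c ≠ -1 then c
       else if q < p then -9999
       else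
         let m0 := if pvPairA s p q then pvVal s C (p + 1) (q - 1) + 2 else -9999
         (PySem.List.pyRange p q 1).foldl
           (fun m k => max m (pvVal s C p k + pvVal s C (k + 1) q)) m0) := by
  rw [pvVal]
  dsimp only
  split_ifs with h1 h2 h3 <;>
    first
      | rfl
      | exact List.foldl_attach (f := fun m k => max m (pvVal s C p k + pvVal s C (k + 1) q))

-- table shape: an n × n table
def pvDims (C : List (List Int)) (b : Int) : Prop := b < (C.length : Int) ∧ ∀ r ∈ C, b < (r.length : Int)

theorem pvWr_dims {C : List (List Int)} {b : Int} (h : pvDims C b) (p q v : Int)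
    (hp0 : 0 ≤ p) (hpn : p ≤ b) : pvDims (pvWr C p q v) b := by
  obtain ⟨h1, h2⟩ := h
  unfold pvWr
  rw [PySem.List.pySetD_of_nonneg _ _ hp0]
  refine ⟨by simpa using h1, ?_⟩
  intro r hr
  rcases List.mem_or_eq_of_mem_set hr with h | h
  · exact h2 r h
  · subst h
    rw [PySem.List.length_pySetD]
    have hlt : p < (C.length : Int) := by omega
    rw [PySem.List.pyGetD_eq_getElem _ _ hp0 hlt]
    exact h2 _ (List.getElem_mem _)

theorem pvRd_pvWr {C : List (List Int)} {b : Int} (hd : pvDims C b) (p q p' q' v : Int)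
    (hp0 : 0 ≤ p) (hpn : p ≤ b) (hq0 : 0 ≤ q) (hqn : q ≤ b)
    (hp0' : 0 ≤ p') (hpn' : p' ≤ b) (hq0' : 0 ≤ q') (hqn' : q' ≤ b) :
    pvRd (pvWr C p q v) p' q' = if p' = p ∧ q' = q then v else pvRd C p' q' := by
  obtain ⟨h1, h2⟩ := hd
  have hlenC : p < (C.length : Int) := by omega
  have hlenC' : p' < (C.length : Int) := by omega
  unfold pvRd pvWr
  rw [PySem.List.pySetD_of_nonneg _ _ hp0]
  have hsetlen : p' < ((C.set p.toNat (PySem.List.pySetD (PySem.List.pyGetD C p []) q v)).length : Int) := by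
    simpa using hlenC'
  rw [PySem.List.pyGetD_eq_getElem _ _ hp0' hsetlen]
  have hp'lt : p'.toNat < C.length := by omega
  rw [List.getElem_set (by simpa using hp'lt)]
  by_cases hpp : p.toNat = p'.toNat
  · have hpe : p' = p := by omega
    simp only [if_pos hpp]
    rw [PySem.List.pyGetD_eq_getElem _ _ hp0 hlenC]
    have hrowlen : b < ((C[p.toNat]'(by omega)).length : Int) := h2 _ (List.getElem_mem _)
    rw [PySem.List.pySetD_of_nonneg _ _ hq0]
    have hq'lt : q' < (((C[p.toNat]'(by omega)).set q.toNat v).length : Int) := by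
      rw [List.length_set]; omega
    rw [PySem.List.pyGetD_eq_getElem _ _ hq0' hq'lt]
    rw [List.getElem_set (by rw [List.length_set] at hq'lt ⊢; omega)]
    by_cases hqq : q.toNat = q'.toNat
    · have hqe : q' = q := by omega
      simp [hpe, hqe, hqq]
    · have hqe : ¬ (q' = q) := by omega
      simp only [if_neg hqq, hpe, hqe, and_false, if_false]
      rw [PySem.List.pyGetD_eq_getElem _ _ hp0 hlenC,
        PySem.List.pyGetD_eq_getElem _ _ hq0' (by omega)]
  · have hpe : ¬ (p' = p) := by omega
    simp only [if_neg hpp, hpe, false_and, if_false]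
    rw [PySem.List.pyGetD_eq_getElem _ _ hp0' hlenC']

-- generic invariant rule for a fold over range(a, b)
theorem pvFoldInv {σ : Type} (f : σ → Int → σ) (P : Int → σ → Prop) :
    ∀ (a : Int) (st : σ) (b : Int), a ≤ b →
      (∀ k st, a ≤ k → k < b → P k st → P (k + 1) (f st k)) →
      P a st → P b ((PySem.List.pyRange a b 1).foldl f st) := by
  intro a st b hab
  obtain ⟨m, hm⟩ : ∃ m : Nat, m = (b - a).toNat := ⟨_, rfl⟩
  induction m generalizing a st with
  | zero =>
    intro hstep hP
    have hba : b ≤ a := by omega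
    have hba' : a = b := le_antisymm hab hba
    rw [PySem.List.pyRange_one_eq_nil hba]
    simpa [hba'] using hP
  | succ m ih =>
    intro hstep hP
    have hlt : a < b := by omega
    rw [PySem.List.pyRange_one_cons hlt]
    simp only [List.foldl_cons]
    exact ih (a + 1) (f st a) (by omega) (by omega)
      (fun k st hk1 hk2 h => hstep k st (by omega) hk2 h)
      (hstep a st le_rfl hlt hP)

-- the pairing test is antisymmetric and irreflexive ('a'/'g' vs 't'/'c' are disjoint)
theorem pvPairA_self (s : String) (p : Int) : pvPairA s p p = false := by
  unfold pvPairA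
  rcases h : pvChr s p == 'a' <;> rcases h2 : pvChr s p == 'g' <;>
    simp_all [beq_iff_eq]

theorem pvPairA_asym (s : String) (p q : Int) (h : pvPairA s p q = true) :
    pvPairA s q p = false := by
  unfold pvPairA at h ⊢
  rcases Bool.or_eq_true_iff.mp h with h' | h' <;>
    obtain ⟨ha, hb⟩ := Bool.and_eq_true_iff.mp h' <;>
      rw [beq_iff_eq] at ha hb <;> simp [ha, hb]

-- consistency of an intermediate cache state with the original cache C0:
-- every cell is either untouched or filled with its pure DP value
def pvCons (s : String) (b : Int) (C0 C : List (List Int)) : Prop :=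
  pvDims C b ∧
  ∀ p q : Int, 0 ≤ p → p ≤ b → 0 ≤ q → q ≤ b →
    pvRd C p q = pvRd C0 p q ∨ (pvRd C0 p q = -1 ∧ pvRd C p q = pvVal s C0 p q)

-- behaviour of A on the "empty" reversed cell (a+1, a) that a pairing attempt touches
theorem goA_empty (s : String) (C0 : List (List Int)) (b a : Int) (fuel : Nat)
    (C L : List (List Int)) (hcons : pvCons s b C0 C)
    (h0 : 0 ≤ a) (han : a + 1 ≤ b)
    (hpair : pvPairA s (a + 1) a = false) :
    (pvGoA s (fuel + 1) (C, L) (a + 1) a).1 = pvVal s C0 (a + 1) a ∧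
    pvCons s b C0 (pvGoA s (fuel + 1) (C, L) (a + 1) a).2.1 := by
  have hdims := hcons.1
  have hcell := hcons.2 (a + 1) a (by omega) (by omega) h0 (by omega)
  simp only [pvGoA]
  by_cases hr : pvRd C (a + 1) a = -1
  · have hr0 : pvRd C0 (a + 1) a = -1 := by
      rcases hcell with h | h
      · omega
      · exact h.1
    have hval : pvVal s C0 (a + 1) a = -9999 := by
      rw [pvVal_eq]
      simp [hr0]
    rw [if_neg (by simp [hr]), if_neg (by simp [hpair])]
    have hrange : a - 1 + 1 = a := by ring
    rw [hrange, PySem.List.pyRange_one_eq_nil (by omega)]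
    simp only [List.foldl_nil]
    have hwr := fun (p' q' : Int) hp' hpn' hq' hqn' => pvRd_pvWr (b := b) hdims (a + 1) a p' q' (-9999 : Int)
      (by omega : (0:Int) ≤ a + 1) han h0 (by omega) hp' hpn' hq' hqn'
    constructor
    · rw [hval]
      rw [hwr (a + 1) a (by omega) han h0 (by omega)]
      simp
    · constructor
      · exact pvWr_dims hdims (a + 1) a (-9999) (by omega) han
      · intro p' q' hp0' hpn' hq0' hqn'
        rw [hwr p' q' hp0' hpn' hq0' hqn']
        by_cases he : p' = a + 1 ∧ q' = a
        · rw [if_pos he]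
          right
          rw [he.1, he.2]
          exact ⟨hr0, by rw [hval]⟩
        · rw [if_neg he]
          exact hcons.2 p' q' hp0' hpn' hq0' hqn'
  · rw [if_pos (by simp [hr])]
    refine ⟨?_, hcons⟩
    rcases hcell with h | h
    · rw [pvVal_eq]
      simp only [h]
      rw [if_pos (by omega)]
    · exact h.2

-- the k-loop of A: its running max is the pure max, and consistency is preserved
theorem loopA (s : String) (C0 : List (List Int)) (b : Int) (fuel : Nat) (p q : Int)
    (ih : ∀ (p' q' : Int) (C' L' : List (List Int)), pvCons s b C0 C' →
      0 ≤ p' → p' ≤ q' → q' ≤ b → (q' - p' + 2).toNat < fuel →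
      (pvGoA s fuel (C', L') p' q').1 = pvVal s C0 p' q' ∧
      pvCons s b C0 (pvGoA s fuel (C', L') p' q').2.1)
    (hp0 : 0 ≤ p) (hpq : p ≤ q) (hqn : q ≤ b)
    (hfuel : (q - p + 2).toNat ≤ fuel) :
    ∀ (ml0 sk0 : Int) (st0 : List (List Int) × List (List Int)), pvCons s b C0 st0.1 →
      ((PySem.List.pyRange p q 1).foldl
          (fun acc k =>
            let r1 := pvGoA s fuel acc.2.2 p k
            let temp := r1.1
            let r2 := pvGoA s fuel r1.2 (k + 1) q
            let temp2 := r2.1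
            let temp := temp + temp2
            if temp > acc.1 then (temp, k, r2.2) else (acc.1, acc.2.1, r2.2))
          (ml0, sk0, st0)).1 =
        (PySem.List.pyRange p q 1).foldl
          (fun m k => max m (pvVal s C0 p k + pvVal s C0 (k + 1) q)) ml0 ∧
      pvCons s b C0 ((PySem.List.pyRange p q 1).foldl
          (fun acc k =>
            let r1 := pvGoA s fuel acc.2.2 p k
            let temp := r1.1
            let r2 := pvGoA s fuel r1.2 (k + 1) q
            let temp2 := r2.1
            let temp := temp + temp2
            if temp > acc.1 then (temp, k, r2.2) else (acc.1, acc.2.1, r2.2))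
          (ml0, sk0, st0)).2.2.1 := by
  intro ml0 sk0 st0 hst0
  have main := pvFoldInv
    (fun acc k =>
      let r1 := pvGoA s fuel acc.2.2 p k
      let temp := r1.1
      let r2 := pvGoA s fuel r1.2 (k + 1) q
      let temp2 := r2.1
      let temp := temp + temp2
      if temp > acc.1 then (temp, k, r2.2) else (acc.1, acc.2.1, r2.2))
    (fun e acc =>
      pvCons s b C0 acc.2.2.1 ∧
      acc.1 = (PySem.List.pyRange p e 1).foldl
        (fun m k => max m (pvVal s C0 p k + pvVal s C0 (k + 1) q)) ml0)
    p (ml0, sk0, st0) q hpq ?step ?init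
  · exact ⟨main.2, main.1⟩
  case init =>
    refine ⟨hst0, ?_⟩
    rw [PySem.List.pyRange_one_eq_nil (le_refl p)]
    rfl
  case step =>
    intro k acc hk1 hk2 hacc
    obtain ⟨haccC, haccV⟩ := hacc
    obtain ⟨h1v, h1c⟩ := ih p k acc.2.2.1 acc.2.2.2 haccC hp0 hk1 (by omega) (by omega)
    obtain ⟨h2v, h2c⟩ := ih (k + 1) q (pvGoA s fuel acc.2.2 p k).2.1 (pvGoA s fuel acc.2.2 p k).2.2
      (by simpa using h1c) (by omega) (by omega) hqn (by omega)
    dsimp only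
    have hstate : (pvGoA s fuel acc.2.2 p k).2 =
        ((pvGoA s fuel acc.2.2 p k).2.1, (pvGoA s fuel acc.2.2 p k).2.2) := rfl
    rw [hstate]
    have hsum : (pvGoA s fuel acc.2.2 p k).1 +
        (pvGoA s fuel ((pvGoA s fuel acc.2.2 p k).2.1, (pvGoA s fuel acc.2.2 p k).2.2) (k + 1) q).1 =
        pvVal s C0 p k + pvVal s C0 (k + 1) q := by
      rw [h2v]
      rw [show acc.2.2 = (acc.2.2.1, acc.2.2.2) from rfl] at h1v
      rw [h1v]
    constructor
    · split_ifs with hgt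
      · exact by simpa using h2c
      · exact by simpa using h2c
    · rw [PySem.List.pyRange_one_succ_right hk1, List.foldl_append, List.foldl_cons, List.foldl_nil]
      rw [← haccV]
      rw [hsum] at *
      split_ifs with hgt <;> dsimp only <;> omega

-- writing the computed value into the cache: final step of one call of A
theorem finishA (s : String) (C0 zC : List (List Int)) (b p q z1 : Int)
    (hz : pvCons s b C0 zC) (hr0 : pvRd C0 p q = -1) (hval : z1 = pvVal s C0 p q)
    (hp0 : 0 ≤ p) (hpn : p ≤ b)
    (hq0 : 0 ≤ q) (hqn : q ≤ b) :
    pvRd (pvWr zC p q z1) p q = pvVal s C0 p q ∧ pvCons s b C0 (pvWr zC p q z1) := by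
  have hwr := fun (p' q' : Int) hp' hpn' hq' hqn' =>
    pvRd_pvWr (b := b) hz.1 p q p' q' z1 hp0 hpn hq0 hqn hp' hpn' hq' hqn'
  constructor
  · rw [hwr p q hp0 hpn hq0 hqn, if_pos ⟨rfl, rfl⟩]
    exact hval
  · refine ⟨pvWr_dims hz.1 p q z1 hp0 hpn, fun p' q' hp' hpn' hq' hqn' => ?_⟩
    rw [hwr p' q' hp' hpn' hq' hqn']
    by_cases he : p' = p ∧ q' = q
    · rw [if_pos he]
      right
      rw [he.1, he.2]
      exact ⟨hr0, hval⟩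
    · rw [if_neg he]
      exact hz.2 p' q' hp' hpn' hq' hqn'

-- A's recursion computes the pure DP value and keeps the cache consistent
theorem goA_spec (s : String) (C0 : List (List Int)) (b : Int) :
    ∀ (fuel : Nat) (p q : Int) (C L : List (List Int)), pvCons s b C0 C →
      0 ≤ p → p ≤ q → q ≤ b → (q - p + 2).toNat < fuel →
      (pvGoA s fuel (C, L) p q).1 = pvVal s C0 p q ∧
      pvCons s b C0 (pvGoA s fuel (C, L) p q).2.1 := by
  intro fuel
  induction fuel with
  | zero => intro p q C L _ _ _ _ hf; exact absurd hf (by omega)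
  | succ fuel ih =>
    intro p q C L hcons hp0 hpq hqn hfuel
    have hq0 : 0 ≤ q := by omega
    have hpn : p ≤ b := by omega
    have hcell := hcons.2 p q hp0 hpn hq0 hqn
    simp only [pvGoA]
    by_cases hr : pvRd C p q = -1
    case neg =>
      rw [if_pos (by simp [hr])]
      refine ⟨?_, hcons⟩
      rcases hcell with h | h
      · rw [pvVal_eq]
        dsimp only
        rw [if_pos (by omega), ← h]
      · exact h.2
    case pos =>
      have hr0 : pvRd C0 p q = -1 := by
        rcases hcell with h | h
        · omega
        · exact h.1
      rw [if_neg (by simp [hr])]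
      have hrange : q - 1 + 1 = q := by ring
      rw [hrange]
      -- the pairing attempt
      have hchild : pvPairA s p q = true →
          (pvGoA s fuel (C, L) (p + 1) (q - 1)).1 = pvVal s C0 (p + 1) (q - 1) ∧
          pvCons s b C0 (pvGoA s fuel (C, L) (p + 1) (q - 1)).2.1 := by
        intro hpair
        by_cases hw : p + 1 ≤ q - 1
        · exact ih (p + 1) (q - 1) C L hcons (by omega) hw (by omega) (by omega)
        · have hq1 : q = p + 1 := by
            rcases (by omega : q = p ∨ q = p + 1) with h | h
            · exfalso
              rw [h, pvPairA_self] at hpair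
              exact Bool.noConfusion hpair
            · exact h
          subst hq1
          obtain ⟨f2, rfl⟩ : ∃ f2, fuel = f2 + 1 := ⟨fuel - 1, by omega⟩
          have he := goA_empty s C0 b p f2 C L hcons hp0 (by omega)
            (pvPairA_asym s p (p + 1) hpair)
          rw [show (p : Int) + 1 - 1 = p from by ring]
          exact he
      -- the initial max_length and state after the pairing attempt
      by_cases hpair : pvPairA s p q = true
      · rw [if_pos hpair]
        obtain ⟨hcv, hcc⟩ := hchild hpair
        obtain ⟨hz1, hz2⟩ := loopA s C0 b fuel p q ih hp0 hpq hqn (by omega)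
          ((pvGoA s fuel (C, L) (p + 1) (q - 1)).1 + 2) 0
          (pvGoA s fuel (C, L) (p + 1) (q - 1)).2 hcc
        have hvv : pvVal s C0 p q = (PySem.List.pyRange p q 1).foldl
            (fun m k => max m (pvVal s C0 p k + pvVal s C0 (k + 1) q))
            ((pvGoA s fuel (C, L) (p + 1) (q - 1)).1 + 2) := by
          rw [pvVal_eq]
          dsimp only
          rw [if_neg (by simp [hr0]), if_neg (by omega), if_pos hpair, ← hcv]
        dsimp only at hz1 hz2 ⊢
        exact finishA s C0 _ b p q _ hz2 hr0 (by rw [hz1, ← hvv]) hp0 hpn hq0 hqn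
      · rw [if_neg hpair]
        obtain ⟨hz1, hz2⟩ := loopA s C0 b fuel p q ih hp0 hpq hqn (by omega)
          (-9999) 0 (C, L) hcons
        have hvv : pvVal s C0 p q = (PySem.List.pyRange p q 1).foldl
            (fun m k => max m (pvVal s C0 p k + pvVal s C0 (k + 1) q)) (-9999) := by
          rw [pvVal_eq]
          dsimp only
          rw [if_neg (by simp [hr0]), if_neg (by omega), if_neg hpair]
        dsimp only at hz1 hz2 ⊢
        exact finishA s C0 _ b p q _ hz2 hr0 (by rw [hz1, ← hvv]) hp0 hpn hq0 hqn
-- B side: the filled part of the best table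
def pvGood (s : String) (C : List (List Int)) (i j W : Int) (best : PySem.Dict (Int × Int) Int) : Prop :=
  ∀ p q : Int, i ≤ p → p ≤ q → q ≤ j → q - p < W → best.get? (p, q) = some (pvVal s C p q)

theorem pvPairAB (s : String) (p q : Int) : pvPairB (pvChr s p) (pvChr s q) = pvPairA s p q := rfl

theorem pvBGet_lt (s : String) (C : List (List Int)) (best : PySem.Dict (Int × Int) Int)
    (p q : Int) (h : q < p) : pvBGet C best p q = pvVal s C p q := by
  unfold pvBGet
  rw [if_pos h, pvVal_eq]
  dsimp only
  split_ifs <;> simp_all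

theorem pvBGet_good (s : String) (C : List (List Int)) (i j W : Int)
    (best : PySem.Dict (Int × Int) Int) (hg : pvGood s C i j W best) (p q : Int)
    (hip : i ≤ p) (hpq : p ≤ q) (hqj : q ≤ j) (hW : q - p < W) :
    pvBGet C best p q = pvVal s C p q := by
  unfold pvBGet
  rw [if_neg (by omega), hg p q hip hpq hqj hW]
  rfl

-- one cell of B computes the pure value
theorem cellB (s : String) (C : List (List Int)) (i j W p : Int)
    (best : PySem.Dict (Int × Int) Int) (hg : pvGood s C i j W best)
    (hW0 : 0 ≤ W) (hip : i ≤ p) (hpj : p + W ≤ j) :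
    (if pvRd C p (p + W) ≠ -1 then pvRd C p (p + W)
     else
       (PySem.List.pyRange p (p + W) 1).foldl
         (fun m k => max m (pvBGet C best p k + pvBGet C best (k + 1) (p + W)))
         (if pvPairB (pvChr s p) (pvChr s (p + W)) then
            pvBGet C best (p + 1) (p + W - 1) + 2
          else -9999)) = pvVal s C p (p + W) := by
  by_cases hc : pvRd C p (p + W) ≠ -1
  · rw [if_pos hc, pvVal_eq]
    dsimp only
    rw [if_pos hc]
  · have hm0 : (if pvPairB (pvChr s p) (pvChr s (p + W)) then
          pvBGet C best (p + 1) (p + W - 1) + 2 else -9999) =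
        (if pvPairA s p (p + W) = true then pvVal s C (p + 1) (p + W - 1) + 2 else -9999) := by
      rw [pvPairAB]
      by_cases hp : pvPairA s p (p + W) = true
      · rw [if_pos hp, if_pos hp]
        by_cases hlt : p + W - 1 < p + 1
        · rw [pvBGet_lt s C best _ _ hlt]
        · have hW1 : pvPairA s p p = false := pvPairA_self s p
          have hWne : W ≠ 0 := by
            intro h0
            rw [h0] at hp
            simp only [add_zero] at hp
            rw [hW1] at hp
            exact Bool.noConfusion hp
          rw [pvBGet_good s C i j W best hg (p + 1) (p + W - 1)
            (by omega) (by omega) (by omega) (by omega)]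
      · rw [if_neg hp, if_neg hp]
    rw [if_neg hc, pvVal_eq]
    dsimp only
    rw [if_neg hc]
    rw [if_neg (show ¬ (p + W < p) from by omega)]
    rw [hm0]
    apply PySem.List.foldl_congr_mem
    intro acc k hk
    have hkb := PySem.List.mem_pyRange_one.mp hk
    rw [pvBGet_good s C i j W best hg p k hip hkb.1 (by omega) (by omega),
      pvBGet_good s C i j W best hg (k + 1) (p + W) (by omega) (by omega) (by omega) (by omega)]

-- B's double loop fills best with the pure values: the returned value is pvVal
theorem altB (s : String) (C Lc : List (List Int)) (i j : Int) (hij : i ≤ j) :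
    genome_length_helper_alt s C Lc i j = pvVal s C i j := by
  unfold genome_length_helper_alt
  have houter := pvFoldInv
    (fun best width =>
      (PySem.List.pyRange i (j - width + 1) 1).foldl
        (fun best p =>
          let q := p + width
          let c := pvRd C p q
          if c ≠ -1 then best.insert (p, q) c
          else
            let m := if pvPairB (pvChr s p) (pvChr s q) then pvBGet C best (p + 1) (q - 1) + 2 else -9999
            let m := (PySem.List.pyRange p q 1).foldl
              (fun m k => max m (pvBGet C best p k + pvBGet C best (k + 1) q)) m
            best.insert (p, q) m)
        best)
    (fun W best => pvGood s C i j W best)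
    0 PySem.Dict.empty (j - i + 1) (by omega) ?step ?init
  case init =>
    intro p q _ hpq _ hW
    exact absurd hW (by omega)
  case step =>
    intro W best hW0 hWlt hgood
    have hinner := pvFoldInv
      (fun best p =>
        let q := p + W
        let c := pvRd C p q
        if c ≠ -1 then best.insert (p, q) c
        else
          let m := if pvPairB (pvChr s p) (pvChr s q) then pvBGet C best (p + 1) (q - 1) + 2 else -9999
          let m := (PySem.List.pyRange p q 1).foldl
            (fun m k => max m (pvBGet C best p k + pvBGet C best (k + 1) q)) m
          best.insert (p, q) m)
      (fun P best => pvGood s C i j W best ∧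
        ∀ p', i ≤ p' → p' < P → best.get? (p', p' + W) = some (pvVal s C p' (p' + W)))
      i best (j - W + 1) (by omega) ?istep ?iinit
    case iinit =>
      exact ⟨hgood, fun p' h1 h2 => absurd h2 (by omega)⟩
    case istep =>
      intro p best' hip hplt hinv
      obtain ⟨hg, hkeys⟩ := hinv
      dsimp only
      have hsplit : ∀ (c m : Int) (d : PySem.Dict (Int × Int) Int),
          (if c ≠ -1 then d.insert (p, p + W) c else d.insert (p, p + W) m) =
          d.insert (p, p + W) (if c ≠ -1 then c else m) := by
        intro c m d
        split_ifs <;> rfl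
      rw [hsplit]
      have hval := cellB s C i j W p best' hg hW0 hip (by omega)
      constructor
      · intro a b h1 h2 h3 h4
        rw [PySem.Dict.get?_insert, if_neg (by
          intro he
          have ha : a = p ∧ b = p + W := by
            constructor
            · exact congrArg Prod.fst he
            · exact congrArg Prod.snd he
          omega)]
        exact hg a b h1 h2 h3 h4
      · intro p' h1 h2
        rw [PySem.Dict.get?_insert]
        by_cases he : p' = p
        · subst he
          rw [if_pos rfl, hval]
        · rw [if_neg (by
            intro hee
            exact he (congrArg Prod.fst hee))]
          exact hkeys p' h1 (by omega)
    -- from the inner invariant to pvGood (W + 1)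
    obtain ⟨hg2, hkeys2⟩ := hinner
    intro p q h1 h2 h3 h4
    by_cases hlt : q - p < W
    · exact hg2 p q h1 h2 h3 hlt
    · have hqW : q = p + W := by omega
      subst hqW
      exact hkeys2 p h1 (by omega)
  -- conclusion
  have hkey := houter i j le_rfl hij le_rfl (by omega)
  dsimp only
  rw [hkey]
  by_cases hc0 : pvRd C i j ≠ -1
  · rw [if_pos hc0, pvVal_eq]
    dsimp only
    rw [if_pos hc0]
  · rw [if_neg hc0, if_neg (show ¬ j < i from by omega)]
    rfl

-- wrapped (Python-style, possibly negative) indices: resolution and write/read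
theorem pyIdx_some (n : Nat) (i : Int) (h : PySem.Raise.InRange n i) :
    ∃ t : Nat, PySem.List.pyIdx? n i = some t ∧ t < n := by
  unfold PySem.Raise.InRange at h
  unfold PySem.List.pyIdx?
  split_ifs with h1 h2 h3
  · exact ⟨i.toNat, rfl, by omega⟩
  · omega
  · exact ⟨n - (-i).toNat, rfl, by omega⟩
  · omega

theorem pvRd_pvWr_self (C : List (List Int)) (i j v : Int)
    (hi : PySem.Raise.InRange C.length i)
    (hj : PySem.Raise.InRange (PySem.List.pyGetD C i []).length j) :
    pvRd (pvWr C i j v) i j = v := by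
  obtain ⟨t, ht, htl⟩ := pyIdx_some C.length i hi
  obtain ⟨u, hu, hul⟩ := pyIdx_some _ j hj
  have hwr : pvWr C i j v = C.set t ((PySem.List.pyGetD C i []).set u v) := by
    unfold pvWr PySem.List.pySetD PySem.List.pySet?
    rw [hu, ht]
    rfl
  rw [hwr]
  unfold pvRd
  have h1 : PySem.List.pyGetD (C.set t ((PySem.List.pyGetD C i []).set u v)) i [] =
      (PySem.List.pyGetD C i []).set u v := by
    unfold PySem.List.pyGetD PySem.List.pyGet?
    rw [List.length_set, ht]
    rw [Option.bind_some, List.getElem?_set_self htl]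
    rfl
  rw [h1]
  unfold PySem.List.pyGetD PySem.List.pyGet? at hu hul ⊢
  rw [List.length_set, hu]
  rw [Option.bind_some, List.getElem?_set_self hul]
  rfl

-- A on a reversed non-pairing interval with an unfilled cell: returns -9999
theorem goA_rev (s : String) (C L : List (List Int)) (i j : Int) (fuel : Nat)
    (hr : pvRd C i j = -1) (hji : j < i) (hpair : pvPairA s i j = false)
    (hi : PySem.Raise.InRange C.length i)
    (hj : PySem.Raise.InRange (PySem.List.pyGetD C i []).length j) :
    (pvGoA s (fuel + 1) (C, L) i j).1 = -9999 := by
  simp only [pvGoA]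
  rw [if_neg (by simp [hr])]
  rw [if_neg (show ¬ pvPairA s i j = true from by simp [hpair])]
  rw [show j - 1 + 1 = j from by ring, PySem.List.pyRange_one_eq_nil (by omega)]
  simp only [List.foldl_nil]
  exact pvRd_pvWr_self C i j _ hi hj

-- ===== VERDICT (by name: the statement is the Claim_ definition above) =====
theorem genome_length_helper_spec : Claim_equal_genome_length_helper := by
  intro s cache l_cache i j _hdom hpre
  unfold Spec_genome_length_helper
  rcases hpre with ⟨hci, hcj, hne⟩ | ⟨hci, hcj, heq, hji, _his, _hjs, hpair, _hli, _hlj⟩ |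
    ⟨hi0, hij, hjn, hclen, hcrow, _hllen, _hlrow⟩
  · -- memoized cell: both sides return cache[i][j]
    unfold genome_length_helper genome_length_helper_alt
    simp only [pvGoA]
    rw [if_pos (by simpa using hne), if_pos hne]
  · -- reversed non-pairing interval: both sides return -9999
    unfold genome_length_helper genome_length_helper_alt
    rw [goA_rev s cache l_cache i j ((j - i + 2).toNat) heq hji hpair hci hcj]
    rw [if_neg (by simpa using heq), if_pos hji]
  · -- the DP case
    rw [altB s cache l_cache i j hij]
    unfold genome_length_helper
    have hcons : pvCons s j cache cache :=
      ⟨⟨hclen, hcrow⟩, fun p q _ _ _ _ => Or.inl rfl⟩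
    exact (goA_spec s cache j ((j - i + 2).toNat + 1) i j cache l_cache hcons hi0 hij le_rfl (by omega)).1
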